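-- pv_equiv track=rewrite | github.com/Life-Atlas/horizon-proposal-analyzer | analyzer.py | find_part_b_start
-- ===== SOURCE A (Python) =====
-- def find_part_b_start(pages: dict) -> int:
--     """Find where Part B technical content begins (skip admin forms)."""
--     for num in sorted(pages.keys()):
--         text = pages[num]
--         if "Part B" in text and num > 5:
--             lower = text.lower()
--             if any(w in lower for w in ['excellence', 'objectives', 'section 1']):
--                 return num
--     for num in sorted(pages.keys()):
--         if "Part B" in pages[num] and "Administrative forms" not in pages[num]:
--             return num
--     return 1
-- ===== SOURCE B (Python) =====
-- def find_part_b_start(pages: dict) -> int: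
--     """Find where Part B technical content begins (skip admin forms)."""
--     fallback = None
--     for num in sorted(pages.keys()):
--         text = pages[num]
--         if "Part B" in text and num > 5 and any(
--                 w in text.lower() for w in ['excellence', 'objectives', 'section 1']):
--             return num
--         if fallback is None and "Part B" in text and "Administrative forms" not in text:
--             fallback = num
--     return fallback if fallback is not None else 1
-- ===== Notes on version B (the rewrite author's own statement) =====
-- stated objective: alternative
-- what changed: A's two sequential early-return scans over sorted(pages.keys()) are merged into a single pass that tracks the earliest fallback candidate in an accumulator and returns a high-priority match immediately.
import Mathlib
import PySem

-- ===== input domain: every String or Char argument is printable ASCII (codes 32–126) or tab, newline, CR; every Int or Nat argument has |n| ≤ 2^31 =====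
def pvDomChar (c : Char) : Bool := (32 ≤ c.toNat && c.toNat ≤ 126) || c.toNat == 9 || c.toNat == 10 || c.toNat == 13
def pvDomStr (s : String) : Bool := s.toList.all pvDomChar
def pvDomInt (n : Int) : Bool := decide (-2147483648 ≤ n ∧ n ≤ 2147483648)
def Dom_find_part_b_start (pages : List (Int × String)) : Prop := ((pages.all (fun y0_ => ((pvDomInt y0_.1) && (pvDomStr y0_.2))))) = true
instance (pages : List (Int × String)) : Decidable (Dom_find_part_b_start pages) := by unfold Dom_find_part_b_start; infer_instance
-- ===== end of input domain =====

-- B merges A's two sequential scans over sorted(pages.keys()) into ONE pass that tracks the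
-- earliest low-priority ("fallback") candidate while searching for a high-priority match
-- (objective: alternative decomposition; same asymptotic cost).

-- ===== PORT A =====
-- Two sequential scans of the sorted key list, each with an early return (ported as find?).
def find_part_b_start (pages : List (Int × String)) : Int :=
  let keys := PySem.List.sorted (pages.map Prod.fst) (fun x => x) false
  match keys.find? (fun num =>
      let text := (PySem.Dict.mk pages).getD num ""
      (PySem.Str.isIn "Part B" text && decide (5 < num)) &&
        (["excellence", "objectives", "section 1"].any
          (fun w => PySem.Str.isIn w (PySem.Str.lower text)))) with
  | some num => num
  | none =>
    match keys.find? (fun num =>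
        PySem.Str.isIn "Part B" ((PySem.Dict.mk pages).getD num "") &&
          !PySem.Str.isIn "Administrative forms" ((PySem.Dict.mk pages).getD num "")) with
    | some num => num
    | none => 1

-- ===== PORT B =====
-- One recursion over the sorted keys carrying the Optional fallback accumulator (Source B's loop).
def pbGo (pages : List (Int × String)) : List Int → Option Int → Int
  | [], fallback => fallback.getD 1
  | num :: rest, fallback =>
    let text := (PySem.Dict.mk pages).getD num ""
    if (PySem.Str.isIn "Part B" text && decide (5 < num)) &&
        (["excellence", "objectives", "section 1"].any
          (fun w => PySem.Str.isIn w (PySem.Str.lower text))) then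
      num
    else
      pbGo pages rest
        (if fallback.isNone && (PySem.Str.isIn "Part B" text &&
            !PySem.Str.isIn "Administrative forms" text) then some num else fallback)

def find_part_b_start_alt (pages : List (Int × String)) : Int :=
  pbGo pages (PySem.List.sorted (pages.map Prod.fst) (fun x => x) false) none

-- ===== PRECONDITION & SPEC =====
def Spec_find_part_b_start (pages : List (Int × String)) (out : Int) : Prop := out = find_part_b_start_alt pages
instance (pages : List (Int × String)) (out : Int) : Decidable (Spec_find_part_b_start pages out) := by unfold Spec_find_part_b_start; infer_instance

-- ===== CLAIM (what is proved, stated in full; the proofs are below) =====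
def Claim_equal_find_part_b_start : Prop := ∀ (pages : List (Int × String)), Dom_find_part_b_start pages → Spec_find_part_b_start pages (find_part_b_start pages)

-- ===== LEMMAS AND PROOFS =====

-- the two predicates A scans with (proof-side abbreviations; defeq to the inline lambdas above)
def pbHi (pages : List (Int × String)) (num : Int) : Bool :=
  let text := (PySem.Dict.mk pages).getD num ""
  (PySem.Str.isIn "Part B" text && decide (5 < num)) &&
    (["excellence", "objectives", "section 1"].any
      (fun w => PySem.Str.isIn w (PySem.Str.lower text)))

def pbLo (pages : List (Int × String)) (num : Int) : Bool :=
  PySem.Str.isIn "Part B" ((PySem.Dict.mk pages).getD num "") &&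
    !PySem.Str.isIn "Administrative forms" ((PySem.Dict.mk pages).getD num "")

-- one-pass loop = first hi-match, else fallback, else first lo-match, else 1
theorem pbGo_spec (pages : List (Int × String)) (l : List Int) (fb : Option Int) :
    pbGo pages l fb =
      match l.find? (pbHi pages) with
      | some k => k
      | none =>
        match fb with
        | some f => f
        | none =>
          match l.find? (pbLo pages) with
          | some k => k
          | none => 1 := by
  induction l generalizing fb with
  | nil => cases fb <;> simp [pbGo, Option.getD]
  | cons num rest ih =>
    show (if pbHi pages num then num else
        pbGo pages rest (if fb.isNone && pbLo pages num then some num else fb)) = _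
    rw [List.find?_cons, List.find?_cons]
    cases hHi : pbHi pages num with
    | true => simp
    | false =>
      simp only [Bool.false_eq_true, if_false, cond_false, ih]
      cases fb with
      | some f => simp
      | none =>
        cases hLo : pbLo pages num with
        | true => simp
        | false => simp

-- ===== VERDICT (by name: the statement is the Claim_ definition above) =====
theorem find_part_b_start_spec : Claim_equal_find_part_b_start := by
  intro pages _
  show find_part_b_start pages = find_part_b_start_alt pages
  unfold find_part_b_start find_part_b_start_alt
  rw [pbGo_spec]
  rfl
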